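-- pv_equiv track=rewrite | github.com/farahbakhsh3/Interleaving_Distance | Main.py | all_subset
-- ===== SOURCE A (Python) =====
-- def all_subset(integ, collection2):
--     i = 0
--     s_gh = []
--     s_j=[]
--     for j in collection2:
--         s_j.append([j])
--     for i in range(1, integ):
--         s_gh = s_j.copy()
--         s_j.clear()
--         for j in range(0,len(s_gh)):
--             for s in collection2:
--                 k = s_gh[j]+[s]
--                 s_j.append(k)
--
--     return s_j
-- ===== SOURCE B (Python) =====
-- def all_subset(integ, collection2):
--     def seqs(n):
--         if n <= 1:
--             return [[x] for x in collection2]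
--         return [p + [s] for p in seqs(n - 1) for s in collection2]
--     return seqs(integ)
-- ===== Notes on version B (the rewrite author's own statement) =====
-- stated objective: simpler
-- what changed: Replaces the iterative level-by-level copy/clear/index accumulation with a short recursion on the sequence length that builds each level as a comprehension over the previous one.
import Mathlib
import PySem

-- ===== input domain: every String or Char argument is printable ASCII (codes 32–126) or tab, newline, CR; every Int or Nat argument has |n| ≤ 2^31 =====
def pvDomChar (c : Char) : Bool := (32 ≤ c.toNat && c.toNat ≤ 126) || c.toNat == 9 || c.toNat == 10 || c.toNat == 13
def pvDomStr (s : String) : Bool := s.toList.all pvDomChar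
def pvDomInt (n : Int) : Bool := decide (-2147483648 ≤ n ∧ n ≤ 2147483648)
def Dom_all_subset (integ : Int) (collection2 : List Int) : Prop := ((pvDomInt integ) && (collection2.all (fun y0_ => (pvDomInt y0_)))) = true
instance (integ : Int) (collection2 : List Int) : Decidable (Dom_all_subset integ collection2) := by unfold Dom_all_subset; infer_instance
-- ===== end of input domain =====

-- B replaces A's iterative level-by-level copy/clear/index accumulation with a recursion
-- on the sequence length (simpler decomposition, same cost); return values are equal.


-- ===== PORT A =====
def all_subset (integ : Int) (collection2 : List Int) : List (List Int) :=
  -- s_j = [[j] for j in collection2]  (built by append in a loop)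
  let s_j := collection2.foldl (fun s_j j => s_j ++ [[j]]) []
  -- for i in range(1, integ): s_gh = s_j.copy(); s_j.clear(); nested loops re-fill s_j
  (PySem.List.pyRange 1 integ 1).foldl
    (fun s_j _i =>
      let s_gh := s_j
      (PySem.List.pyRange 0 (s_gh.length : Int) 1).foldl
        (fun s_j j =>
          collection2.foldl
            (fun s_j s => s_j ++ [PySem.List.pyGetD s_gh j [] ++ [s]]) s_j)
        [])
    s_j

-- ===== PORT B =====
def seqsB (collection2 : List Int) : Nat → List (List Int)
  | 0 => collection2.map (fun x => [x])
  | 1 => collection2.map (fun x => [x])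
  | n + 2 => (seqsB collection2 (n + 1)).flatMap (fun p => collection2.map (fun s => p ++ [s]))

def all_subset_alt (integ : Int) (collection2 : List Int) : List (List Int) :=
  seqsB collection2 integ.toNat

-- ===== PRECONDITION & SPEC =====
def Spec_all_subset (integ : Int) (collection2 : List Int) (out : List (List Int)) : Prop := out = all_subset_alt integ collection2
instance (integ : Int) (collection2 : List Int) (out : List (List Int)) : Decidable (Spec_all_subset integ collection2 out) := by unfold Spec_all_subset; infer_instance

-- ===== CLAIM (what is proved, stated in full; the proofs are below) =====
def Claim_equal_all_subset : Prop := ∀ (integ : Int) (collection2 : List Int), Dom_all_subset integ collection2 → Spec_all_subset integ collection2 (all_subset integ collection2)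

-- ===== LEMMAS AND PROOFS =====

-- one level of A's loop: the nested index/element loops produce exactly the flatMap step
def stepF (c : List Int) (L : List (List Int)) : List (List Int) :=
  L.flatMap (fun p => c.map (fun s => p ++ [s]))

theorem foldl_append_flat {α β : Type} (g : α → List β) :
    ∀ (L : List α) (init : List β), L.foldl (fun acc p => acc ++ g p) init = init ++ L.flatMap g := by
  intro L
  induction L with
  | nil => simp
  | cons x xs ih => intro init; simp [List.foldl_cons, ih]

theorem foldl_append_single {α β : Type} (f : β → α) (l : List β) (init : List α) :
    l.foldl (fun acc x => acc ++ [f x]) init = init ++ l.map f := by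
  rw [foldl_append_flat (fun x => [f x]) l init]
  congr 1
  induction l <;> simp_all

theorem foldl_congr' {α β : Type} {f g : α → β → α} {l : List β} {init : α}
    (h : ∀ a b, f a b = g a b) : l.foldl f init = l.foldl g init := by
  induction l generalizing init with
  | nil => rfl
  | cons x xs ih => simp only [List.foldl_cons, h, ih]

theorem inner_eq (c : List Int) (L : List (List Int)) :
    (PySem.List.pyRange 0 (L.length : Int) 1).foldl
      (fun s_j j =>
        c.foldl (fun s_j s => s_j ++ [PySem.List.pyGetD L j [] ++ [s]]) s_j) []
    = stepF c L := by
  rw [PySem.List.foldl_pyRange_zero_pyGetD' L ([] : List Int)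
      (fun acc p => c.foldl (fun s_j s => s_j ++ [p ++ [s]]) acc) []]
  calc L.foldl (fun acc p => c.foldl (fun s_j s => s_j ++ [p ++ [s]]) acc) []
      = L.foldl (fun acc p => acc ++ c.map (fun s => p ++ [s])) [] := by
        apply foldl_congr'
        intro acc p
        exact foldl_append_single (fun s => p ++ [s]) c acc
    _ = stepF c L := by
        rw [foldl_append_flat (fun p => c.map (fun s => p ++ [s])) L []]; rfl

theorem foldl_const_iterate {α β : Type} (f : α → α) :
    ∀ (l : List β) (init : α), l.foldl (fun b _ => f b) init = f^[l.length] init := by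
  intro l
  induction l with
  | nil => intro init; rfl
  | cons x xs ih => intro init; simp [List.foldl_cons, ih, Function.iterate_succ_apply]

theorem seqsB_iterate (c : List Int) :
    ∀ (m : Nat), seqsB c (m + 1) = (stepF c)^[m] (c.map (fun x => [x])) := by
  intro m
  induction m with
  | zero => rfl
  | succ k ih =>
      rw [Function.iterate_succ_apply', ← ih]
      rfl

theorem base_eq (c : List Int) :
    c.foldl (fun s_j j => s_j ++ [[j]]) [] = c.map (fun x => [x]) := by
  rw [foldl_append_single (fun j => [j]) c []]
  rfl

-- ===== VERDICT (by name: the statement is the Claim_ definition above) =====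
theorem all_subset_spec : Claim_equal_all_subset := by
  intro integ c _
  unfold Spec_all_subset all_subset all_subset_alt
  simp only []
  have houter :
      (PySem.List.pyRange 1 integ 1).foldl
        (fun s_j _i =>
          (PySem.List.pyRange 0 ((s_j.length : Nat) : Int) 1).foldl
            (fun s_j' j =>
              c.foldl (fun s_j'' s => s_j'' ++ [PySem.List.pyGetD s_j j [] ++ [s]]) s_j')
            [])
        (c.foldl (fun s_j j => s_j ++ [[j]]) [])
      = (stepF c)^[(PySem.List.pyRange 1 integ 1).length] (c.map (fun x => [x])) := by
    rw [base_eq]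
    have hcong : (PySem.List.pyRange 1 integ 1).foldl
        (fun s_j _i =>
          (PySem.List.pyRange 0 ((s_j.length : Nat) : Int) 1).foldl
            (fun s_j' j =>
              c.foldl (fun s_j'' s => s_j'' ++ [PySem.List.pyGetD s_j j [] ++ [s]]) s_j')
            [])
        (c.map (fun x => [x]))
        = (PySem.List.pyRange 1 integ 1).foldl (fun s_j _i => stepF c s_j)
            (c.map (fun x => [x])) := by
      apply foldl_congr'
      intro acc b
      exact inner_eq c acc
    rw [hcong, foldl_const_iterate (stepF c)]
  rw [houter, PySem.List.length_pyRange_one]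
  rcases le_or_gt integ 1 with h | h
  · have h1 : (integ - 1).toNat = 0 := by omega
    rw [h1]
    have h2 : integ.toNat = 0 ∨ integ.toNat = 1 := by omega
    rcases h2 with h2 | h2 <;> rw [h2] <;> rfl
  · have h1 : integ.toNat = (integ - 1).toNat + 1 := by omega
    rw [h1, seqsB_iterate]
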